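-- pv_equiv track=rewrite | github.com/AruJoy/algorithm-study | 백준/Gold/15685. 드래곤 커브/드래곤 커브.py | generate_curves
-- ===== SOURCE A (Python) =====
-- def generate_curves(max_gen: int):
--     dragon_curves = []
--     dragon_curves.append([[0,0],[0,1]])
--
--     for gen in range(max_gen):
--         before_gen = dragon_curves[gen]
--         current_gen = [coordinate for coordinate in before_gen]
--         for i in range(len(before_gen)-1):
--             current_coordinate = before_gen[len(before_gen) -1 - i]
--             before_coordinate = before_gen[len(before_gen) -2 - i]
--             delta_y = before_coordinate[1] - current_coordinate[1]
--             delta_x = current_coordinate[0] - before_coordinate[0]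
--             new_coordinate = [current_gen[-1][0] + delta_y, current_gen[-1][1] + delta_x]
--             current_gen.append(new_coordinate)
--         dragon_curves.append(current_gen)
--     return dragon_curves
-- ===== SOURCE B (Python) =====
-- def generate_curves(max_gen: int):
--     curves = [[[0, 0], [0, 1]]]
--     prev = curves[0]
--     for _ in range(max_gen):
--         px, py = prev[-1]
--         prev = prev + [[px + (y - py), py - (x - px)]
--                        for x, y in reversed(prev[:-1])]
--         curves.append(prev)
--     return curves
-- ===== Notes on version B (the rewrite author's own statement) =====
-- stated objective: simpler
-- what changed: Each new generation is produced by rotating every prior point directly about the fixed pivot (the previous curve's last point) in one comprehension, instead of A's inner loop that threads a running endpoint accumulator (current_gen[-1]) and consecutive-point deltas.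
import Mathlib
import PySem

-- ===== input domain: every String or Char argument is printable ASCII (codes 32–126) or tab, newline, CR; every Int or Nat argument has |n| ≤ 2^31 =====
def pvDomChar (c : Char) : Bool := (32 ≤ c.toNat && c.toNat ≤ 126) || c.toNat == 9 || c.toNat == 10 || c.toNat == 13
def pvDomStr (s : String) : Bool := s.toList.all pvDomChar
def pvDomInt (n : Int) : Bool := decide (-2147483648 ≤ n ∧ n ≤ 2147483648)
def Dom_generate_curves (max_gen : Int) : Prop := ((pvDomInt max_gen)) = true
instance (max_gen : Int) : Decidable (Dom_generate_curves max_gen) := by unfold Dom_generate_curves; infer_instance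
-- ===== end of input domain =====

-- B replaces A's inner loop, which threads a running endpoint accumulator (current_gen[-1])
-- and consecutive-point deltas, by a direct quarter-turn rotation of each prior point about
-- the fixed pivot (the previous curve's last point); same cost, simpler per-point step.

set_option maxHeartbeats 1000000

-- ===== PORT A =====
-- one iteration of A's inner loop (loop variable i of range(len(before_gen)-1))
def pvStepA (before : List (List Int)) (cur : List (List Int)) (i : Int) : List (List Int) :=
  let current := PySem.List.pyGetD before ((before.length : Int) - 1 - i) ([] : List Int)
  let beforec := PySem.List.pyGetD before ((before.length : Int) - 2 - i) ([] : List Int)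
  let delta_y := PySem.List.pyGetD beforec 1 0 - PySem.List.pyGetD current 1 0
  let delta_x := PySem.List.pyGetD current 0 0 - PySem.List.pyGetD beforec 0 0
  let last := PySem.List.pyGetD cur (-1) ([] : List Int)
  cur ++ [[PySem.List.pyGetD last 0 0 + delta_y, PySem.List.pyGetD last 1 0 + delta_x]]

def generate_curves (max_gen : Int) : List (List (List Int)) :=
  (PySem.List.pyRange 0 max_gen 1).foldl
    (fun dcs gen =>
      let before := PySem.List.pyGetD dcs gen ([] : List (List Int))
      let cur := (PySem.List.pyRange 0 ((before.length : Int) - 1) 1).foldl (pvStepA before) before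
      dcs ++ [cur])
    [[[0, 0], [0, 1]]]

-- ===== PORT B =====
-- rotate point p a quarter turn about the pivot (px, py)
def pvRot (px py : Int) (p : List Int) : List Int :=
  [px + (PySem.List.pyGetD p 1 0 - py), py - (PySem.List.pyGetD p 0 0 - px)]

-- one generation in B: the previous curve plus all its prior points rotated about the pivot
def pvStepB (prev : List (List Int)) : List (List Int) :=
  let pivot := PySem.List.pyGetD prev (-1) ([] : List Int)
  let px := PySem.List.pyGetD pivot 0 0
  let py := PySem.List.pyGetD pivot 1 0
  prev ++ ((PySem.List.slice prev none (some (-1))).reverse.map (pvRot px py))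

def generate_curves_alt (max_gen : Int) : List (List (List Int)) :=
  ((PySem.List.pyRange 0 max_gen 1).foldl
      (fun (st : List (List (List Int)) × List (List Int)) _ =>
        let nxt := pvStepB st.2
        (st.1 ++ [nxt], nxt))
      ([[[0, 0], [0, 1]]], [[0, 0], [0, 1]])).1

-- ===== PRECONDITION & SPEC =====
def Spec_generate_curves (max_gen : Int) (out : List (List (List Int))) : Prop := out = generate_curves_alt max_gen
instance (max_gen : Int) (out : List (List (List Int))) : Decidable (Spec_generate_curves max_gen out) := by unfold Spec_generate_curves; infer_instance

-- ===== CLAIM (what is proved, stated in full; the proofs are below) =====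
def Claim_equal_generate_curves : Prop := ∀ (max_gen : Int), Dom_generate_curves max_gen → Spec_generate_curves max_gen (generate_curves max_gen)

-- ===== LEMMAS AND PROOFS =====

-- the pure sequence of generations produced by B
def pvIter : Nat → List (List Int)
  | 0 => [[0, 0], [0, 1]]
  | n + 1 => pvStepB (pvIter n)

theorem pvStepB_eq (prev : List (List Int)) :
    pvStepB prev = prev ++ prev.dropLast.reverse.map
      (pvRot (PySem.List.pyGetD (PySem.List.pyGetD prev (-1) ([] : List Int)) 0 0)
             (PySem.List.pyGetD (PySem.List.pyGetD prev (-1) ([] : List Int)) 1 0)) := by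
  simp [pvStepB, PySem.List.slice_to_neg_one]

theorem pvIter_ne_nil (n : Nat) : pvIter n ≠ [] := by
  induction n with
  | zero => simp [pvIter]
  | succ m ih =>
    rw [pvIter, pvStepB_eq]
    intro hc
    exact ih (List.append_eq_nil_iff.mp hc).1

-- A's inner-loop invariant: after i iterations the curve is prev plus the first i points of
-- prev (taken from the end, excluding the pivot) rotated about the fixed pivot
theorem pvRowA_inv (prev : List (List Int)) (h : prev ≠ []) (i : Nat)
    (hi : i ≤ prev.length - 1) :
    ((List.range i).map (fun k : ℕ => (k : Int))).foldl (pvStepA prev) prev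
      = prev ++ (prev.dropLast.reverse.take i).map
          (pvRot (PySem.List.pyGetD (PySem.List.pyGetD prev (-1) ([] : List Int)) 0 0)
                 (PySem.List.pyGetD (PySem.List.pyGetD prev (-1) ([] : List Int)) 1 0)) := by
  have hL : 0 < prev.length := List.length_pos_iff.mpr h
  set px := PySem.List.pyGetD (PySem.List.pyGetD prev (-1) ([] : List Int)) 0 0 with hpx
  set py := PySem.List.pyGetD (PySem.List.pyGetD prev (-1) ([] : List Int)) 1 0 with hpy
  have hrevlen : prev.dropLast.reverse.length = prev.length - 1 := by simp
  have htake : ∀ j : Nat, j < prev.length - 1 →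
      prev.dropLast.reverse.take (j+1)
        = prev.dropLast.reverse.take j ++ [prev[prev.length - 2 - j]'(by omega)] := by
    intro j hj
    have hjr : j < prev.dropLast.reverse.length := by omega
    have hrev : prev.dropLast.reverse[j]'hjr = prev[prev.length - 2 - j]'(by omega) := by
      rw [List.getElem_reverse, List.getElem_dropLast]
      congr 1
      simp; omega
    rw [List.take_add_one, List.getElem?_eq_getElem hjr, hrev]; rfl
  have hpiv : PySem.List.pyGetD prev (-1) ([] : List Int) = prev[prev.length - 1]'(by omega) := by
    rw [PySem.List.pyGetD_neg_one prev ([] : List Int) h, List.getLast_eq_getElem]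
  induction i with
  | zero => simp
  | succ i ih =>
    have hi' : i ≤ prev.length - 1 := by omega
    have hlt : i < prev.length - 1 := by omega
    rw [List.range_succ, List.map_append, List.foldl_append, ih hi' htake hpiv]
    have hcur : PySem.List.pyGetD prev ((prev.length : Int) - 1 - (i:Int)) ([] : List Int)
        = prev[prev.length - 1 - i]'(by omega) := by
      rw [PySem.List.pyGetD_eq_getElem prev ([] : List Int) (by omega) (by omega)]
      congr 1
      omega
    have hbef : PySem.List.pyGetD prev ((prev.length : Int) - 2 - (i:Int)) ([] : List Int)
        = prev[prev.length - 2 - i]'(by omega) := by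
      rw [PySem.List.pyGetD_eq_getElem prev ([] : List Int) (by omega) (by omega)]
      congr 1
      omega
    have hlast0 : PySem.List.pyGetD (PySem.List.pyGetD
          (prev ++ (prev.dropLast.reverse.take i).map (pvRot px py)) (-1) ([] : List Int)) 0 0
        = px + (PySem.List.pyGetD (prev[prev.length - 1 - i]'(by omega)) 1 0 - py) := by
      cases i with
      | zero =>
        simp only [List.take_zero, List.map_nil, List.append_nil, Nat.sub_zero, hpiv, hpx, hpy]
        omega
      | succ j =>
        rw [htake j (by omega), List.map_append, ← List.append_assoc, List.map_cons, List.map_nil,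
          PySem.List.pyGetD_neg_one_append_singleton]
        have hidx : prev.length - 2 - j = prev.length - 1 - (j+1) := by omega
        simp only [hidx, pvRot]
        simp [pysem]
    have hlast1 : PySem.List.pyGetD (PySem.List.pyGetD
          (prev ++ (prev.dropLast.reverse.take i).map (pvRot px py)) (-1) ([] : List Int)) 1 0
        = py - (PySem.List.pyGetD (prev[prev.length - 1 - i]'(by omega)) 0 0 - px) := by
      cases i with
      | zero =>
        simp only [List.take_zero, List.map_nil, List.append_nil, Nat.sub_zero, hpiv, hpx, hpy]
        omega
      | succ j =>
        rw [htake j (by omega), List.map_append, ← List.append_assoc, List.map_cons, List.map_nil,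
          PySem.List.pyGetD_neg_one_append_singleton]
        have hidx : prev.length - 2 - j = prev.length - 1 - (j+1) := by omega
        simp only [hidx, pvRot]
        simp [pysem]
    simp only [List.map_cons, List.map_nil, List.foldl_cons, List.foldl_nil, pvStepA,
      hcur, hbef, hlast0, hlast1]
    rw [htake i hlt, List.map_append, ← List.append_assoc]
    simp [pvRot]
    constructor <;> ring

-- A's inner loop computes exactly B's generation step
theorem pvRowA_eq_stepB (prev : List (List Int)) (h : prev ≠ []) :
    (PySem.List.pyRange 0 ((prev.length : Int) - 1) 1).foldl (pvStepA prev) prev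
      = pvStepB prev := by
  have hL : 0 < prev.length := List.length_pos_iff.mpr h
  have hn : (((prev.length : Int) - 1) - 0).toNat = prev.length - 1 := by omega
  rw [PySem.List.pyRange_one, hn]
  simp only [zero_add]
  rw [pvRowA_inv prev h (prev.length - 1) le_rfl, pvStepB_eq]
  congr 1
  congr 1
  exact List.take_of_length_le (by simp)

-- outer loops: A's accumulated list is the list of B's generations
theorem pvOuterA (N : Nat) :
    ((List.range N).map (fun k : ℕ => (k : Int))).foldl
      (fun dcs gen =>
        dcs ++ [(PySem.List.pyRange 0 (((PySem.List.pyGetD dcs gen ([] : List (List Int))).length : Int) - 1) 1).foldl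
                  (pvStepA (PySem.List.pyGetD dcs gen ([] : List (List Int))))
                  (PySem.List.pyGetD dcs gen ([] : List (List Int)))])
      [[[0, 0], [0, 1]]]
      = (List.range (N + 1)).map pvIter := by
  induction N with
  | zero => simp [pvIter]
  | succ N ih =>
    rw [List.range_succ, List.map_append, List.foldl_append, ih]
    have hbefore : PySem.List.pyGetD ((List.range (N + 1)).map pvIter) ((N : Nat) : Int)
        ([] : List (List Int)) = pvIter N := by
      rw [PySem.List.pyGetD_natCast]
      simp [List.getD]
    simp only [List.map_cons, List.map_nil, List.foldl_cons, List.foldl_nil, hbefore]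
    rw [pvRowA_eq_stepB (pvIter N) (pvIter_ne_nil N)]
    rw [List.range_succ (n := N + 1), List.map_append]
    rfl

theorem pvOuterB (N : Nat) :
    ((List.range N).map (fun k : ℕ => (k : Int))).foldl
      (fun (st : List (List (List Int)) × List (List Int)) _ =>
        (st.1 ++ [pvStepB st.2], pvStepB st.2))
      ([[[0, 0], [0, 1]]], [[0, 0], [0, 1]])
      = ((List.range (N + 1)).map pvIter, pvIter N) := by
  induction N with
  | zero => simp [pvIter]
  | succ N ih =>
    rw [List.range_succ, List.map_append, List.foldl_append, ih]
    simp only [List.map_cons, List.map_nil, List.foldl_cons, List.foldl_nil]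
    rw [List.range_succ (n := N + 1), List.map_append]
    rfl

-- ===== VERDICT (by name: the statement is the Claim_ definition above) =====
theorem generate_curves_spec : Claim_equal_generate_curves := by
  intro max_gen _
  unfold Spec_generate_curves generate_curves generate_curves_alt
  rw [PySem.List.pyRange_one]
  simp only [Int.sub_zero, zero_add]
  rw [pvOuterA max_gen.toNat, pvOuterB max_gen.toNat]
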